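-- pv_equiv track=rewrite | github.com/gribskov/RNA | fasta_fix.py | fasta_fixbases
-- ===== SOURCE A (Python) =====
-- def fasta_fixbases(fasta):
--     """---------------------------------------------------------------------------------------------
--     Sequences may contain not ACGT bases, convert them to A
--
--     :paraam fasta: dict, , {'id', 'documentation', 'sequence'}
--     :return: fasta, int, number of bases changed
--     ---------------------------------------------------------------------------------------------"""
--     newbase = 'A'
--     base = list(fasta['sequence'])
--     changed = 0
--     for i in range(len(base)):
--         if base[i] not in 'ACGTU':
--             base[i] = newbase
--             changed += 1
--
--     return ''.join(base), changed
-- ===== SOURCE B (Python) =====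
-- import re
--
-- def fasta_fixbases(fasta):
--     return re.subn('[^ACGTU]', 'A', fasta['sequence'])
-- ===== Notes on version B (the rewrite author's own statement) =====
-- stated objective: idiomatic
-- what changed: Replaced the explicit index loop that mutates a char list in place with a single re.subn('[^ACGTU]', 'A', ...) call whose returned count is the number of changed bases.
import Mathlib
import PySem

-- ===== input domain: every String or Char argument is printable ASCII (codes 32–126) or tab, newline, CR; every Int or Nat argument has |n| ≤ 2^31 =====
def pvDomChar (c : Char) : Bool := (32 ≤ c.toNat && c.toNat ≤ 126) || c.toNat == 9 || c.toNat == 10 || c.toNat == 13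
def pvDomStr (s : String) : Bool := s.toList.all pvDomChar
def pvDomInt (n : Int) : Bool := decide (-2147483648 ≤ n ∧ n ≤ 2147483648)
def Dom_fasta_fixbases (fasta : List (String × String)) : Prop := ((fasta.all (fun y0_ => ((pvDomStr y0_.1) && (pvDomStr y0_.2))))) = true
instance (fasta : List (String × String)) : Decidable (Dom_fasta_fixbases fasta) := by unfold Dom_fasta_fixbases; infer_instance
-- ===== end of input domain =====

-- B replaces A's in-place index loop over a char list with one regex substitution,
-- re.subn('[^ACGTU]', 'A', …), whose count is the number of changed bases; same O(n)
-- cost, more idiomatic. Pre_ excludes dicts without a 'sequence' key (A raises KeyError).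

-- ===== PORT A =====
-- A's loop body: if base[i] not in 'ACGTU': base[i] = 'A'; changed += 1
def pvStepA (st : List Char × Int) (i : Int) : List Char × Int :=
  if ¬ ((PySem.List.pyGetD st.1 i 'A') ∈ "ACGTU".toList) then
    (PySem.List.pySetD st.1 i 'A', st.2 + 1)
  else st

def fasta_fixbases (fasta : List (String × String)) : String × Int :=
  let base := ((PySem.Dict.mk fasta).getD "sequence" "").toList
  let st := (PySem.List.pyRange 0 (base.length : Int) 1).foldl pvStepA (base, 0)
  (String.ofList st.1, st.2)

-- ===== PORT B =====
-- The regex pattern [^ACGTU] matches exactly one non-ACGTU character, so subn is an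
-- elementwise replacement and its count a countP; the regex engine is ported by hand
-- as that map/count (exact for this single-character class).
def pvFix (c : Char) : Char := if c ∈ "ACGTU".toList then c else 'A'
def pvBad (c : Char) : Bool := !(c ∈ "ACGTU".toList)

def fasta_fixbases_alt (fasta : List (String × String)) : String × Int :=
  let seq := ((PySem.Dict.mk fasta).getD "sequence" "").toList
  (String.ofList (seq.map pvFix), (seq.countP pvBad : Int))

-- ===== PRECONDITION & SPEC =====
-- Pre_ excludes only inputs with no 'sequence' key, on which Python A raises KeyError.
def Pre_fasta_fixbases (fasta : List (String × String)) : Prop :=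
  ((PySem.Dict.mk fasta).get? "sequence").isSome = true
instance (fasta : List (String × String)) : Decidable (Pre_fasta_fixbases fasta) := by
  unfold Pre_fasta_fixbases; infer_instance

def pvWitness_fasta_fixbases : (List (String × String)) := [("sequence", "ACxGT")]

def Spec_fasta_fixbases (fasta : List (String × String)) (out : String × Int) : Prop := out = fasta_fixbases_alt fasta
instance (fasta : List (String × String)) (out : String × Int) : Decidable (Spec_fasta_fixbases fasta out) := by unfold Spec_fasta_fixbases; infer_instance

-- ===== CLAIM (what is proved, stated in full; the proofs are below) =====
def Claim_equal_fasta_fixbases : Prop := ∀ (fasta : List (String × String)), Dom_fasta_fixbases fasta → Pre_fasta_fixbases fasta → Spec_fasta_fixbases fasta (fasta_fixbases fasta)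

-- ===== LEMMAS AND PROOFS =====

-- Loop invariant: with the first ys.length positions already processed, A's loop over the
-- remaining indices maps the suffix elementwise by pvFix and adds its pvBad count.
theorem pvLoopA (xs ys : List Char) (c : Int) :
    (PySem.List.pyRange (ys.length : Int) ((ys.length : Int) + (xs.length : Int)) 1).foldl
        pvStepA (ys ++ xs, c)
      = (ys ++ xs.map pvFix, c + (xs.countP pvBad : Int)) := by
  induction xs generalizing ys c with
  | nil => simp [PySem.List.pyRange_one_eq_nil]
  | cons x xs ih =>
    have hlt : (ys.length : Int) < (ys.length : Int) + ((x :: xs).length : Int) := by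
      push_cast [List.length_cons]; omega
    rw [PySem.List.pyRange_one_cons hlt, List.foldl_cons]
    have hget : PySem.List.pyGetD (ys ++ x :: xs) (ys.length : Int) 'A' = x := by
      rw [PySem.List.pyGetD_natCast]
      simp [List.getD_eq_getElem?_getD]
    have hup : (ys.length : Int) + ((x :: xs).length : Int)
        = ((ys.length : Int) + 1) + (xs.length : Int) := by
      push_cast [List.length_cons]; ring
    rw [hup]
    by_cases hx : x ∈ "ACGTU".toList
    · have hfix : pvFix x = x := by unfold pvFix; rw [if_pos hx]
      have hbad : pvBad x = false := by unfold pvBad; rw [decide_eq_true hx]; rfl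
      have hstep : pvStepA (ys ++ x :: xs, c) (ys.length : Int) = (ys ++ x :: xs, c) := by
        unfold pvStepA; rw [hget, if_neg (not_not_intro hx)]
      rw [hstep]
      have key := ih (ys ++ [x]) c
      have hlen : (((ys ++ [x]).length : Nat) : Int) = (ys.length : Int) + 1 := by
        push_cast [List.length_append, List.length_cons, List.length_nil]; ring
      rw [hlen] at key
      rw [List.append_cons ys x xs, key, List.map_cons, hfix,
          List.append_cons ys x (xs.map pvFix), List.countP_cons, hbad]
      simp
    · have hfix : pvFix x = 'A' := by unfold pvFix; rw [if_neg hx]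
      have hbad : pvBad x = true := by unfold pvBad; rw [decide_eq_false hx]; rfl
      have hstep : pvStepA (ys ++ x :: xs, c) (ys.length : Int)
          = (ys ++ 'A' :: xs, c + 1) := by
        unfold pvStepA; rw [hget, if_pos hx, PySem.List.pySetD_natCast]
        simp
      rw [hstep]
      have key := ih (ys ++ ['A']) (c + 1)
      have hlen : (((ys ++ ['A']).length : Nat) : Int) = (ys.length : Int) + 1 := by
        push_cast [List.length_append, List.length_cons, List.length_nil]; ring
      rw [hlen] at key
      rw [List.append_cons ys 'A' xs, key, List.map_cons, hfix,
          List.append_cons ys 'A' (xs.map pvFix), List.countP_cons, hbad]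
      refine Prod.ext rfl ?_
      simp only [if_true]
      push_cast; omega

theorem pvLoopA0 (xs : List Char) :
    (PySem.List.pyRange 0 (xs.length : Int) 1).foldl pvStepA (xs, 0)
      = (xs.map pvFix, (xs.countP pvBad : Int)) := by
  have := pvLoopA xs [] 0
  simpa using this

-- ===== VERDICT (by name: the statement is the Claim_ definition above) =====
theorem fasta_fixbases_spec : Claim_equal_fasta_fixbases := by
  intro fasta _ _
  unfold Spec_fasta_fixbases fasta_fixbases fasta_fixbases_alt
  simp only [pvLoopA0]
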